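-- pv_equiv track=rewrite | github.com/cacsoftware/pyeay | pyeay/dbcac/conexiondb.py | crearMultiUpdateSql
-- ===== SOURCE A (Python) =====
-- def crearMultiUpdateSql(nom_tabla, rows, cols_busqueda, cols_a_modificar, nom_campos, tipo_campos):
-- 	"""
-- 			EJEMPLO
--
-- 			nom_tabla = 'producto'
--
-- 			nom_campos = ['id', 'marca', 'ref', 'color', 'precio_detal', 'precio_mayor']
--
-- 			tipo_campos = ['int', 'str', 'str', 'str', 'int', 'int']
--
-- 			rows = [
-- 						['1', 'AEROFLEX', '1609', 'GRIS', '500', '1000'],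
-- 						['2', 'AEROFLEX', '8801', 'ROJO', '600', '1200'],
-- 						['3', 'AEROFLEX', 'J2268', 'NARANJADO', '400', '800'],
-- 						['4', 'AEROFLEX', 'R328', 'VERDE', '550', '1100']
-- 					]
--
-- 			cols_busqueda = [1, 2, 3]
-- 			cols_a_modificar = [4, 5]
--
-- 			RESULTADO
--
-- 			UPDATE producto SET
-- 					precio_detal = CASE
-- 										WHEN marca = 'AEROFLEX' AND ref = '1609' AND color = 'GRIS'  THEN 500
-- 										WHEN marca = 'AEROFLEX' AND ref = '8801' AND color = 'ROJO'  THEN 600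
-- 										WHEN marca = 'AEROFLEX' AND ref = 'J2268' AND color = 'NARANJADO'  THEN 400
-- 										WHEN marca = 'AEROFLEX' AND ref = 'R328' AND color = 'VERDE'  THEN 550
-- 									END,
-- 					precio_mayor = CASE
-- 										WHEN marca = 'AEROFLEX' AND ref = '1609' AND color = 'GRIS'  THEN 1000
-- 										WHEN marca = 'AEROFLEX' AND ref = '8801' AND color = 'ROJO'  THEN 1200
-- 										WHEN marca = 'AEROFLEX' AND ref = 'J2268' AND color = 'NARANJADO'  THEN 800
-- 										WHEN marca = 'AEROFLEX' AND ref = 'R328' AND color = 'VERDE'  THEN 1100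
-- 									END
-- 			WHERE 	marca IN (AEROFLEX, AEROFLEX, AEROFLEX, AEROFLEX)  AND
-- 					ref IN (1609, 8801, J2268, R328)  AND
-- 					color IN (GRIS, ROJO, NARANJADO, VERDE)
--
-- 			"""
--
-- 	cad = ''
-- 	cad_WHEN = ''
-- 	cad_CASE = ''
--
-- 	for i in cols_a_modificar:
-- 		## craear un   CASE ... END,
-- 		cad_WHEN = ''
-- 		for fila in rows:
-- 			## crear un   WHEN  ...  THEN
-- 			cad = ''
-- 			for k in cols_busqueda:
-- 				## enlazamos con AND cada comparacion   por ejemplo  ref = 'R155'  AND color = 'NEGRO'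
-- 				nomCampo = nom_campos[k]
-- 				tipoCampo = tipo_campos[k]
-- 				dato = fila[k]
-- 				if tipoCampo == 'str':
-- 					dato = "'" + dato + "'"
-- 				cad += nomCampo + " = " + str(dato) + " AND "
-- 			cad = cad[:-4]
--
-- 			valor = fila[i]
-- 			tipoCampo = tipo_campos[i]
-- 			if tipoCampo == 'str':
-- 				valor = "'" + valor + "'"
-- 			cad_WHEN += ' WHEN ' + cad + ' THEN ' + str(valor) + '  '
--
-- 		nomCampo = nom_campos[i]
-- 		cad_CASE += nomCampo + ' = CASE ' + cad_WHEN + ' END,'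
--
-- 	cad_CASE = cad_CASE[:-1]
--
-- 	sSql = 'UPDATE ' + nom_tabla + ' SET ' + cad_CASE
--
-- 	cad_WHERE = ''
-- 	for j in cols_busqueda:
-- 		nomCampo = nom_campos[j]
-- 		cad_WHERE += nomCampo + ' IN ('
-- 		for fila in rows:
-- 			dato = fila[j]
-- 			tipoCampo = tipo_campos[j]
-- 			if tipoCampo == 'str':
-- 				dato = "'" + dato + "'"
-- 			cad_WHERE += str(dato) + ', '
-- 		cad_WHERE = cad_WHERE[:-2] + ')  AND '
--
-- 	cad_WHERE = cad_WHERE[:-4]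
--
-- 	sSql = 'UPDATE ' + nom_tabla + ' SET ' + cad_CASE + ' WHERE ' + cad_WHERE
--
-- 	return sSql
-- ===== SOURCE B (Python) =====
-- def crearMultiUpdateSql(nom_tabla, rows, cols_busqueda, cols_a_modificar, nom_campos, tipo_campos):
--     def q(k, v):
--         return "'" + v + "'" if tipo_campos[k] == 'str' else v
--
--     # one pass over rows: the WHERE-condition string of each row
--     conds = [' AND '.join(nom_campos[k] + ' = ' + q(k, fila[k]) for k in cols_busqueda)
--              for fila in rows]
--
--     cases = ','.join(
--         nom_campos[i] + ' = CASE ' +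
--         ''.join(' WHEN ' + cond + '  THEN ' + q(i, fila[i]) + '  '
--                 for cond, fila in zip(conds, rows)) +
--         ' END'
--         for i in cols_a_modificar)
--
--     where_items = [nom_campos[j] + ' IN (' + ', '.join(q(j, fila[j]) for fila in rows) + ')'
--                    for j in cols_busqueda]
--     where = '  AND '.join(where_items) + ('  ' if where_items else '')
--
--     return 'UPDATE ' + nom_tabla + ' SET ' + cases + ' WHERE ' + where
-- ===== Notes on version B (the rewrite author's own statement) =====
-- stated objective: alternative
-- what changed: B precomputes each row's WHERE-condition string in one separate pass and assembles every fragment (CASE blocks, WHEN clauses, IN lists, WHERE clause) with joins over comprehensions, instead of A's triple-nested += accumulation with trailing-character trims.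
-- intended difference: On degenerate inputs (no rows but search columns, or rows but no search columns and columns to modify) A's trailing-character slicing returns malformed fragments ('a IN)' with the '(' chopped off, 'WHEN THEN' with collapsed spacing) while B returns the uniformly formatted 'a IN ()' / 'WHEN THEN'; B's regular formatting is the intended shape of the generated SQL. — e.g. on crearMultiUpdateSql("t", [], [0], [], ["a"], ["int"]): A returns "UPDATE t SET WHERE a IN) ", B returns "UPDATE t SET WHERE a IN () "
import Mathlib
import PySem

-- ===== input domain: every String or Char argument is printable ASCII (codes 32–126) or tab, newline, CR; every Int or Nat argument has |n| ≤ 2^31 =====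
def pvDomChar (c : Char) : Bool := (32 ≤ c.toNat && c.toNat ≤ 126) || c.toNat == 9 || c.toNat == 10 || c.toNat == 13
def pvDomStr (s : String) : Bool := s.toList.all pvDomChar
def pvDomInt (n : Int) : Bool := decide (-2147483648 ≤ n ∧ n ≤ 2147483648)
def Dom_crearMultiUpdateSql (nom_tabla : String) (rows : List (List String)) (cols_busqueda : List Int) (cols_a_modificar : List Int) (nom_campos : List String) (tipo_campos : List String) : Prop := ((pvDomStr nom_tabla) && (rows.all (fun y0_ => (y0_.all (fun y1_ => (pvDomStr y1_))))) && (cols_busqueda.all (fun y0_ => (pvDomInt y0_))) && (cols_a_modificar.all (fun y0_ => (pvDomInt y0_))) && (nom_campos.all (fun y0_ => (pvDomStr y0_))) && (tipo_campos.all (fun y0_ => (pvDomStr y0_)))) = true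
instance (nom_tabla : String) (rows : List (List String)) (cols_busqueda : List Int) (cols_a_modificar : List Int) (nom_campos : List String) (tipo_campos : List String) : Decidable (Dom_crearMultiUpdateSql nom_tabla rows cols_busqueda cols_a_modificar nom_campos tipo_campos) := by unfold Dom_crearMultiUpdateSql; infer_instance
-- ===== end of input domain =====

-- B re-decomposes the string assembly: per-row WHERE-conditions are precomputed once and every
-- fragment is assembled with joins instead of A's += accumulation with trailing-character trims
-- (objective: alternative decomposition, same cost).

-- ===== PORT A =====
def crearMultiUpdateSql (nom_tabla : String) (rows : List (List String)) (cols_busqueda : List Int) (cols_a_modificar : List Int) (nom_campos : List String) (tipo_campos : List String) : String :=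
  "UPDATE " ++ nom_tabla ++ " SET " ++
    PySem.Str.slice (cols_a_modificar.foldl (fun cad_CASE i =>
      cad_CASE ++ (PySem.List.pyGet? nom_campos i).getD "" ++ " = CASE " ++
        (rows.foldl (fun cad_WHEN fila =>
          cad_WHEN ++ " WHEN " ++
            PySem.Str.slice (cols_busqueda.foldl (fun cad k =>
              cad ++ (PySem.List.pyGet? nom_campos k).getD "" ++ " = " ++
                (if (PySem.List.pyGet? tipo_campos k).getD "" = "str"
                 then "'" ++ (PySem.List.pyGet? fila k).getD "" ++ "'"
                 else (PySem.List.pyGet? fila k).getD "") ++ " AND ") "")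
              none (some (-4)) ++
          " THEN " ++
            (if (PySem.List.pyGet? tipo_campos i).getD "" = "str"
             then "'" ++ (PySem.List.pyGet? fila i).getD "" ++ "'"
             else (PySem.List.pyGet? fila i).getD "") ++ "  ") "") ++
      " END,") "")
      none (some (-1)) ++
  " WHERE " ++
    PySem.Str.slice (cols_busqueda.foldl (fun cad_WHERE j =>
      PySem.Str.slice (rows.foldl (fun cw fila =>
          cw ++ (if (PySem.List.pyGet? tipo_campos j).getD "" = "str"
                 then "'" ++ (PySem.List.pyGet? fila j).getD "" ++ "'"
                 else (PySem.List.pyGet? fila j).getD "") ++ ", ")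
        (cad_WHERE ++ (PySem.List.pyGet? nom_campos j).getD "" ++ " IN ("))
        none (some (-2)) ++ ")  AND ") "")
      none (some (-4))

-- ===== PORT B =====
def pvQ (tipo_campos : List String) (k : Int) (v : String) : String :=
  if (PySem.List.pyGet? tipo_campos k).getD "" = "str" then "'" ++ v ++ "'" else v

def crearMultiUpdateSql_alt (nom_tabla : String) (rows : List (List String)) (cols_busqueda : List Int) (cols_a_modificar : List Int) (nom_campos : List String) (tipo_campos : List String) : String :=
  let conds := rows.map (fun fila =>
    PySem.Str.join " AND " (cols_busqueda.map (fun k =>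
      (PySem.List.pyGet? nom_campos k).getD "" ++ " = " ++ pvQ tipo_campos k ((PySem.List.pyGet? fila k).getD ""))))
  let cases := PySem.Str.join "," (cols_a_modificar.map (fun i =>
    (PySem.List.pyGet? nom_campos i).getD "" ++ " = CASE " ++
    PySem.Str.join "" ((conds.zip rows).map (fun cf =>
      " WHEN " ++ cf.1 ++ "  THEN " ++ pvQ tipo_campos i ((PySem.List.pyGet? cf.2 i).getD "") ++ "  ")) ++
    " END"))
  let whereItems := cols_busqueda.map (fun j =>
    (PySem.List.pyGet? nom_campos j).getD "" ++ " IN (" ++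
    PySem.Str.join ", " (rows.map (fun fila => pvQ tipo_campos j ((PySem.List.pyGet? fila j).getD ""))) ++ ")")
  "UPDATE " ++ nom_tabla ++ " SET " ++ cases ++ " WHERE " ++
    (PySem.Str.join "  AND " whereItems ++ (if whereItems = [] then "" else "  "))

-- ===== PRECONDITION & SPEC =====
-- Pre_ excludes exactly the inputs where Python A raises IndexError: some searched/modified
-- column index is out of range for nom_campos, or (when rows exist, so the row loops run)
-- for tipo_campos or for some row.
def Pre_crearMultiUpdateSql (nom_tabla : String) (rows : List (List String)) (cols_busqueda : List Int) (cols_a_modificar : List Int) (nom_campos : List String) (tipo_campos : List String) : Prop :=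
  (∀ k ∈ cols_busqueda ++ cols_a_modificar, PySem.Raise.InRange nom_campos.length k) ∧
  (rows ≠ [] → ∀ k ∈ cols_busqueda ++ cols_a_modificar,
    PySem.Raise.InRange tipo_campos.length k ∧ ∀ fila ∈ rows, PySem.Raise.InRange fila.length k)
instance (nom_tabla : String) (rows : List (List String)) (cols_busqueda : List Int) (cols_a_modificar : List Int) (nom_campos : List String) (tipo_campos : List String) : Decidable (Pre_crearMultiUpdateSql nom_tabla rows cols_busqueda cols_a_modificar nom_campos tipo_campos) := by unfold Pre_crearMultiUpdateSql; infer_instance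

def pvWitness_crearMultiUpdateSql : String × List (List String) × List Int × List Int × List String × List String :=
  ("producto", [["1", "AE", "500"], ["2", "BX", "600"]], [1], [2], ["id", "marca", "precio"], ["int", "str", "int"])

-- On degenerate inputs (no rows but search columns present, or rows present but no search
-- columns and some column to modify) A's trailing-character slicing produces malformed
-- fragments ('col IN)' with the '(' chopped off; 'WHEN  THEN' with collapsed spacing), while
-- B keeps the uniform format ('col IN ()', 'WHEN   THEN'); B's regular formatting is intended.
def D_crearMultiUpdateSql (nom_tabla : String) (rows : List (List String)) (cols_busqueda : List Int) (cols_a_modificar : List Int) (nom_campos : List String) (tipo_campos : List String) : Prop :=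
  (rows = [] ∧ cols_busqueda ≠ []) ∨ (cols_busqueda = [] ∧ rows ≠ [] ∧ cols_a_modificar ≠ [])
instance (nom_tabla : String) (rows : List (List String)) (cols_busqueda : List Int) (cols_a_modificar : List Int) (nom_campos : List String) (tipo_campos : List String) : Decidable (D_crearMultiUpdateSql nom_tabla rows cols_busqueda cols_a_modificar nom_campos tipo_campos) := by unfold D_crearMultiUpdateSql; infer_instance

def Spec_crearMultiUpdateSql (nom_tabla : String) (rows : List (List String)) (cols_busqueda : List Int) (cols_a_modificar : List Int) (nom_campos : List String) (tipo_campos : List String) (out : String) : Prop := ¬ D_crearMultiUpdateSql nom_tabla rows cols_busqueda cols_a_modificar nom_campos tipo_campos → out = crearMultiUpdateSql_alt nom_tabla rows cols_busqueda cols_a_modificar nom_campos tipo_campos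
instance (nom_tabla : String) (rows : List (List String)) (cols_busqueda : List Int) (cols_a_modificar : List Int) (nom_campos : List String) (tipo_campos : List String) (out : String) : Decidable (Spec_crearMultiUpdateSql nom_tabla rows cols_busqueda cols_a_modificar nom_campos tipo_campos out) := by unfold Spec_crearMultiUpdateSql; infer_instance

def pvDiffWitness_crearMultiUpdateSql : String × List (List String) × List Int × List Int × List String × List String :=
  ("t", [], [0], [], ["a"], ["int"])
def pvDiffWitnessOut_crearMultiUpdateSql : String × String :=
  ("UPDATE t SET  WHERE a IN)  ", "UPDATE t SET  WHERE a IN ()  ")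

-- ===== CLAIM (what is proved, stated in full; the proofs are below) =====
def Claim_unchanged_crearMultiUpdateSql : Prop := ∀ (nom_tabla : String) (rows : List (List String)) (cols_busqueda : List Int) (cols_a_modificar : List Int) (nom_campos : List String) (tipo_campos : List String), Dom_crearMultiUpdateSql nom_tabla rows cols_busqueda cols_a_modificar nom_campos tipo_campos → Pre_crearMultiUpdateSql nom_tabla rows cols_busqueda cols_a_modificar nom_campos tipo_campos → Spec_crearMultiUpdateSql nom_tabla rows cols_busqueda cols_a_modificar nom_campos tipo_campos (crearMultiUpdateSql nom_tabla rows cols_busqueda cols_a_modificar nom_campos tipo_campos)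
def Claim_changed_crearMultiUpdateSql : Prop := Dom_crearMultiUpdateSql (pvDiffWitness_crearMultiUpdateSql.1) (pvDiffWitness_crearMultiUpdateSql.2.1) (pvDiffWitness_crearMultiUpdateSql.2.2.1) (pvDiffWitness_crearMultiUpdateSql.2.2.2.1) (pvDiffWitness_crearMultiUpdateSql.2.2.2.2.1) (pvDiffWitness_crearMultiUpdateSql.2.2.2.2.2) ∧ Pre_crearMultiUpdateSql (pvDiffWitness_crearMultiUpdateSql.1) (pvDiffWitness_crearMultiUpdateSql.2.1) (pvDiffWitness_crearMultiUpdateSql.2.2.1) (pvDiffWitness_crearMultiUpdateSql.2.2.2.1) (pvDiffWitness_crearMultiUpdateSql.2.2.2.2.1) (pvDiffWitness_crearMultiUpdateSql.2.2.2.2.2) ∧ D_crearMultiUpdateSql (pvDiffWitness_crearMultiUpdateSql.1) (pvDiffWitness_crearMultiUpdateSql.2.1) (pvDiffWitness_crearMultiUpdateSql.2.2.1) (pvDiffWitness_crearMultiUpdateSql.2.2.2.1) (pvDiffWitness_crearMultiUpdateSql.2.2.2.2.1) (pvDiffWitness_crearMultiUpdateSql.2.2.2.2.2) ∧ crearMultiUpdateSql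 (pvDiffWitness_crearMultiUpdateSql.1) (pvDiffWitness_crearMultiUpdateSql.2.1) (pvDiffWitness_crearMultiUpdateSql.2.2.1) (pvDiffWitness_crearMultiUpdateSql.2.2.2.1) (pvDiffWitness_crearMultiUpdateSql.2.2.2.2.1) (pvDiffWitness_crearMultiUpdateSql.2.2.2.2.2) = pvDiffWitnessOut_crearMultiUpdateSql.1 ∧ crearMultiUpdateSql_alt (pvDiffWitness_crearMultiUpdateSql.1) (pvDiffWitness_crearMultiUpdateSql.2.1) (pvDiffWitness_crearMultiUpdateSql.2.2.1) (pvDiffWitness_crearMultiUpdateSql.2.2.2.1) (pvDiffWitness_crearMultiUpdateSql.2.2.2.2.1) (pvDiffWitness_crearMultiUpdateSql.2.2.2.2.2) = pvDiffWitnessOut_crearMultiUpdateSql.2 ∧ pvDiffWitnessOut_crearMultiUpdateSql.1 ≠ pvDiffWitnessOut_crearMultiUpdateSql.2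


def Claim_exact_crearMultiUpdateSql : Prop := ∀ (nom_tabla : String) (rows : List (List String)) (cols_busqueda : List Int) (cols_a_modificar : List Int) (nom_campos : List String) (tipo_campos : List String), Dom_crearMultiUpdateSql nom_tabla rows cols_busqueda cols_a_modificar nom_campos tipo_campos → Pre_crearMultiUpdateSql nom_tabla rows cols_busqueda cols_a_modificar nom_campos tipo_campos → D_crearMultiUpdateSql nom_tabla rows cols_busqueda cols_a_modificar nom_campos tipo_campos → crearMultiUpdateSql nom_tabla rows cols_busqueda cols_a_modificar nom_campos tipo_campos ≠ crearMultiUpdateSql_alt nom_tabla rows cols_busqueda cols_a_modificar nom_campos tipo_campos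

-- ===== LEMMAS AND PROOFS =====

theorem pvWitness_ok : Dom_crearMultiUpdateSql (pvWitness_crearMultiUpdateSql.1) (pvWitness_crearMultiUpdateSql.2.1) (pvWitness_crearMultiUpdateSql.2.2.1) (pvWitness_crearMultiUpdateSql.2.2.2.1) (pvWitness_crearMultiUpdateSql.2.2.2.2.1) (pvWitness_crearMultiUpdateSql.2.2.2.2.2) ∧ Pre_crearMultiUpdateSql (pvWitness_crearMultiUpdateSql.1) (pvWitness_crearMultiUpdateSql.2.1) (pvWitness_crearMultiUpdateSql.2.2.1) (pvWitness_crearMultiUpdateSql.2.2.2.1) (pvWitness_crearMultiUpdateSql.2.2.2.2.1) (pvWitness_crearMultiUpdateSql.2.2.2.2.2) := by decide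

-- canonical fragments (B's shape), used only by the proofs
def pvPartS (nom_campos tipo_campos fila : List String) (k : Int) : String :=
  (PySem.List.pyGet? nom_campos k).getD "" ++ " = " ++ pvQ tipo_campos k ((PySem.List.pyGet? fila k).getD "")
def pvCondS (nom_campos tipo_campos : List String) (cols_busqueda : List Int) (fila : List String) : String :=
  PySem.Str.join " AND " (cols_busqueda.map (pvPartS nom_campos tipo_campos fila))
def pvWhenS (nom_campos tipo_campos : List String) (cols_busqueda : List Int) (i : Int) (fila : List String) : String :=
  " WHEN " ++ pvCondS nom_campos tipo_campos cols_busqueda fila ++ "  THEN " ++ pvQ tipo_campos i ((PySem.List.pyGet? fila i).getD "") ++ "  "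
def pvCaseS (nom_campos tipo_campos : List String) (cols_busqueda : List Int) (rows : List (List String)) (i : Int) : String :=
  (PySem.List.pyGet? nom_campos i).getD "" ++ " = CASE " ++
    PySem.Str.join "" (rows.map (pvWhenS nom_campos tipo_campos cols_busqueda i)) ++ " END"
def pvItemS (nom_campos tipo_campos : List String) (rows : List (List String)) (j : Int) : String :=
  (PySem.List.pyGet? nom_campos j).getD "" ++ " IN (" ++
    PySem.Str.join ", " (rows.map (fun fila => pvQ tipo_campos j ((PySem.List.pyGet? fila j).getD ""))) ++ ")"

-- generic string plumbing
theorem pvToListInj {s t : String} (h : s.toList = t.toList) : s = t := String.toList_inj.mp h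

theorem pvNilApp (s : String) : "" ++ s = s := pvToListInj (by simp)

theorem pvAppNil (s : String) : s ++ "" = s := pvToListInj (by simp)

theorem pvJoinNilSep (ps : List (List Char)) : PySem.Chars.join [] ps = ps.flatten := by
  induction ps with
  | nil => simp [PySem.Chars.join_nil]
  | cons p rest ih =>
    cases rest with
    | nil => simp [PySem.Chars.join_singleton]
    | cons q r => simp [PySem.Chars.join_cons_cons] at ih ⊢; simp [ih]

theorem pvFoldlApp {α : Type} (l : List α) (f : α → String) (a : String) :
    l.foldl (fun acc x => acc ++ f x) a = a ++ PySem.Str.join "" (l.map f) := by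
  induction l generalizing a with
  | nil => simp [PySem.Str.join]
  | cons x xs ih =>
    rw [List.foldl_cons, ih]
    apply pvToListInj
    simp [pvJoinNilSep]

theorem pvFlatTrim (ps : List (List Char)) (sep : List Char) (k : ℕ) (hps : ps ≠ [])
    (hsep : k ≤ sep.length) :
    ((ps.map (· ++ sep)).flatten).take (((ps.map (· ++ sep)).flatten).length - k)
      = PySem.Chars.join sep ps ++ sep.take (sep.length - k) := by
  induction ps with
  | nil => exact absurd rfl hps
  | cons p rest ih =>
    cases rest with
    | nil =>
      simp only [List.map_cons, List.map_nil, List.flatten_cons, List.flatten_nil,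
        List.append_nil, PySem.Chars.join_singleton, List.length_append]
      rw [List.take_append, List.take_of_length_le (by omega)]
      have h1 : p.length + sep.length - k - p.length = sep.length - k := by omega
      rw [h1]
    | cons q r =>
      have hfl : (((p :: q :: r).map (· ++ sep)).flatten)
          = (p ++ sep) ++ (((q :: r).map (· ++ sep)).flatten) := by simp
      have hlen : sep.length ≤ (((q :: r).map (· ++ sep)).flatten).length := by
        simp; omega
      rw [hfl, List.length_append, List.take_append, List.take_of_length_le (by omega)]
      have h2 : (p ++ sep).length + (((q :: r).map (· ++ sep)).flatten).length - k - (p ++ sep).length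
          = (((q :: r).map (· ++ sep)).flatten).length - k := by omega
      rw [h2, ih (by simp), PySem.Chars.join_cons_cons]
      simp [List.append_assoc]

theorem pvJoinLen (ps : List String) (sep : String) (hps : ps ≠ []) :
    sep.toList.length ≤ (PySem.Str.join "" (ps.map (· ++ sep))).toList.length := by
  cases ps with
  | nil => exact absurd rfl hps
  | cons p rest =>
    simp [pvJoinNilSep, List.map_map, Function.comp]
    omega

theorem pvSliceApp (s t : String) (k : Int) (hk : 0 < k) (h : k.toNat ≤ t.toList.length) :
    PySem.Str.slice (s ++ t) none (some (-k)) = s ++ PySem.Str.slice t none (some (-k)) := by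
  apply pvToListInj
  have hk' : -k = -((k.toNat : ℕ) : ℤ) := by omega
  simp only [PySem.Str.toList_slice, PySem.Chars.slice_eq_listSlice, String.toList_append, hk']
  rw [PySem.List.slice_to_neg_natCast _ _ (by omega), PySem.List.slice_to_neg_natCast _ _ (by omega)]
  rw [List.length_append, List.take_append, List.take_of_length_le (by omega)]
  have h1 : s.toList.length + t.toList.length - k.toNat - s.toList.length
      = t.toList.length - k.toNat := by omega
  rw [h1]

theorem pvJoinTrim (ps : List String) (sep : String) (k : Int) (hps : ps ≠ []) (hk : 0 < k)
    (hsep : k.toNat ≤ sep.toList.length) :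
    PySem.Str.slice (PySem.Str.join "" (ps.map (· ++ sep))) none (some (-k)) =
      PySem.Str.join sep ps ++ PySem.Str.slice sep none (some (-k)) := by
  apply pvToListInj
  have hk' : -k = -((k.toNat : ℕ) : ℤ) := by omega
  have hm : List.map String.toList (ps.map (· ++ sep)) = (ps.map String.toList).map (· ++ sep.toList) := by
    simp [List.map_map, Function.comp]
  simp only [PySem.Str.toList_slice, PySem.Chars.slice_eq_listSlice, String.toList_append,
    PySem.Str.toList_join, hk']
  rw [hm, show ("" : String).toList = [] from rfl, pvJoinNilSep,
      PySem.List.slice_to_neg_natCast _ _ (by omega),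
      PySem.List.slice_to_neg_natCast _ _ (by omega)]
  exact pvFlatTrim (ps.map String.toList) sep.toList k.toNat (by simpa using hps) hsep

theorem pvSliceEmpty (k : Int) : PySem.Str.slice "" none (some (-k)) = "" := by
  apply pvToListInj
  simp [PySem.List.slice]

theorem pvZipMapSelf {α β : Type} (f : α → β) (l : List α) :
    (l.map f).zip l = l.map (fun x => (f x, x)) := by
  induction l with
  | nil => simp
  | cons x xs ih => simp [ih]

-- the inner condition loop of A, trimmed, is B's " AND "-join plus one trailing space
theorem pvCondA (nom_campos tipo_campos : List String) (cols_busqueda : List Int)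
    (fila : List String) (h : cols_busqueda ≠ []) :
    PySem.Str.slice (cols_busqueda.foldl (fun cad k =>
        cad ++ (PySem.List.pyGet? nom_campos k).getD "" ++ " = " ++
          (if (PySem.List.pyGet? tipo_campos k).getD "" = "str"
           then "'" ++ (PySem.List.pyGet? fila k).getD "" ++ "'"
           else (PySem.List.pyGet? fila k).getD "") ++ " AND ") "")
      none (some (-4))
    = pvCondS nom_campos tipo_campos cols_busqueda fila ++ " " := by
  have hb : cols_busqueda.foldl (fun cad k =>
        cad ++ (PySem.List.pyGet? nom_campos k).getD "" ++ " = " ++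
          (if (PySem.List.pyGet? tipo_campos k).getD "" = "str"
           then "'" ++ (PySem.List.pyGet? fila k).getD "" ++ "'"
           else (PySem.List.pyGet? fila k).getD "") ++ " AND ") ""
      = cols_busqueda.foldl (fun cad k =>
        cad ++ (pvPartS nom_campos tipo_campos fila k ++ " AND ")) "" := by
    apply PySem.List.foldl_congr_mem
    intro acc k _
    apply pvToListInj
    simp [pvPartS, pvQ]
  rw [hb, pvFoldlApp, pvNilApp]
  have hm : cols_busqueda.map (fun k => pvPartS nom_campos tipo_campos fila k ++ " AND ")
      = (cols_busqueda.map (pvPartS nom_campos tipo_campos fila)).map (· ++ " AND ") := by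
    simp [List.map_map]
  rw [hm, pvJoinTrim _ _ 4 (by simpa using h) (by norm_num) (by decide)]
  have h4 : PySem.Str.slice " AND " none (some (-4)) = " " := by decide
  rw [h4]
  rfl

-- the WHEN loop of A equals B's join over rows
theorem pvWhenFold (nom_campos tipo_campos : List String) (cols_busqueda : List Int)
    (rows : List (List String)) (i : Int) (h : rows = [] ∨ cols_busqueda ≠ []) :
    rows.foldl (fun cad_WHEN fila =>
        cad_WHEN ++ " WHEN " ++
          PySem.Str.slice (cols_busqueda.foldl (fun cad k =>
            cad ++ (PySem.List.pyGet? nom_campos k).getD "" ++ " = " ++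
              (if (PySem.List.pyGet? tipo_campos k).getD "" = "str"
               then "'" ++ (PySem.List.pyGet? fila k).getD "" ++ "'"
               else (PySem.List.pyGet? fila k).getD "") ++ " AND ") "")
            none (some (-4)) ++
        " THEN " ++
          (if (PySem.List.pyGet? tipo_campos i).getD "" = "str"
           then "'" ++ (PySem.List.pyGet? fila i).getD "" ++ "'"
           else (PySem.List.pyGet? fila i).getD "") ++ "  ") ""
    = PySem.Str.join "" (rows.map (pvWhenS nom_campos tipo_campos cols_busqueda i)) := by
  rcases h with h | h
  · subst h; apply pvToListInj; simp [pvJoinNilSep]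
  · have hb : ∀ (acc : String) (fila : List String), fila ∈ rows →
        (acc ++ " WHEN " ++
          PySem.Str.slice (cols_busqueda.foldl (fun cad k =>
            cad ++ (PySem.List.pyGet? nom_campos k).getD "" ++ " = " ++
              (if (PySem.List.pyGet? tipo_campos k).getD "" = "str"
               then "'" ++ (PySem.List.pyGet? fila k).getD "" ++ "'"
               else (PySem.List.pyGet? fila k).getD "") ++ " AND ") "")
            none (some (-4)) ++
        " THEN " ++
          (if (PySem.List.pyGet? tipo_campos i).getD "" = "str"
           then "'" ++ (PySem.List.pyGet? fila i).getD "" ++ "'"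
           else (PySem.List.pyGet? fila i).getD "") ++ "  ")
        = acc ++ pvWhenS nom_campos tipo_campos cols_busqueda i fila := by
      intro acc fila _
      rw [pvCondA nom_campos tipo_campos cols_busqueda fila h]
      apply pvToListInj
      simp [pvWhenS, pvQ]
    rw [PySem.List.foldl_congr_mem _ _ _ _ hb, pvFoldlApp, pvNilApp]

-- A's CASE accumulation with its trailing-comma trim is B's ","-join of CASE blocks
theorem pvCaseA (nom_campos tipo_campos : List String) (cols_busqueda : List Int)
    (rows : List (List String)) (cols_a_modificar : List Int)
    (h : cols_a_modificar = [] ∨ rows = [] ∨ cols_busqueda ≠ []) :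
    PySem.Str.slice (cols_a_modificar.foldl (fun cad_CASE i =>
      cad_CASE ++ (PySem.List.pyGet? nom_campos i).getD "" ++ " = CASE " ++
        (rows.foldl (fun cad_WHEN fila =>
          cad_WHEN ++ " WHEN " ++
            PySem.Str.slice (cols_busqueda.foldl (fun cad k =>
              cad ++ (PySem.List.pyGet? nom_campos k).getD "" ++ " = " ++
                (if (PySem.List.pyGet? tipo_campos k).getD "" = "str"
                 then "'" ++ (PySem.List.pyGet? fila k).getD "" ++ "'"
                 else (PySem.List.pyGet? fila k).getD "") ++ " AND ") "")
              none (some (-4)) ++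
          " THEN " ++
            (if (PySem.List.pyGet? tipo_campos i).getD "" = "str"
             then "'" ++ (PySem.List.pyGet? fila i).getD "" ++ "'"
             else (PySem.List.pyGet? fila i).getD "") ++ "  ") "") ++
      " END,") "")
      none (some (-1))
    = PySem.Str.join "," (cols_a_modificar.map (pvCaseS nom_campos tipo_campos cols_busqueda rows)) := by
  rcases h with h | h
  · subst h
    rw [List.foldl_nil, pvSliceEmpty 1]
    rfl
  · have hb : ∀ (acc : String) (i : Int), i ∈ cols_a_modificar →
        (acc ++ (PySem.List.pyGet? nom_campos i).getD "" ++ " = CASE " ++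
          (rows.foldl (fun cad_WHEN fila =>
            cad_WHEN ++ " WHEN " ++
              PySem.Str.slice (cols_busqueda.foldl (fun cad k =>
                cad ++ (PySem.List.pyGet? nom_campos k).getD "" ++ " = " ++
                  (if (PySem.List.pyGet? tipo_campos k).getD "" = "str"
                   then "'" ++ (PySem.List.pyGet? fila k).getD "" ++ "'"
                   else (PySem.List.pyGet? fila k).getD "") ++ " AND ") "")
                none (some (-4)) ++
            " THEN " ++
              (if (PySem.List.pyGet? tipo_campos i).getD "" = "str"
               then "'" ++ (PySem.List.pyGet? fila i).getD "" ++ "'"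
               else (PySem.List.pyGet? fila i).getD "") ++ "  ") "") ++
        " END,")
        = acc ++ (pvCaseS nom_campos tipo_campos cols_busqueda rows i ++ ",") := by
      intro acc i _
      rw [pvWhenFold nom_campos tipo_campos cols_busqueda rows i h]
      apply pvToListInj
      simp [pvCaseS]
    rw [PySem.List.foldl_congr_mem _ _ _ _ hb, pvFoldlApp, pvNilApp]
    cases hcm : cols_a_modificar with
    | nil => rfl
    | cons c cs =>
      have hm : (c :: cs).map (fun i => pvCaseS nom_campos tipo_campos cols_busqueda rows i ++ ",")
          = ((c :: cs).map (pvCaseS nom_campos tipo_campos cols_busqueda rows)).map (· ++ ",") := by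
        simp [List.map_map]
      rw [hm, pvJoinTrim _ _ 1 (by simp) (by norm_num) (by decide)]
      have h1 : PySem.Str.slice "," none (some (-1)) = "" := by decide
      rw [h1, pvAppNil]

-- A's WHERE accumulation with its trims is B's "  AND "-join of IN items plus "  "
theorem pvWhereA (nom_campos tipo_campos : List String) (rows : List (List String))
    (cols_busqueda : List Int) (h : cols_busqueda = [] ∨ rows ≠ []) :
    PySem.Str.slice (cols_busqueda.foldl (fun cad_WHERE j =>
      PySem.Str.slice (rows.foldl (fun cw fila =>
          cw ++ (if (PySem.List.pyGet? tipo_campos j).getD "" = "str"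
                 then "'" ++ (PySem.List.pyGet? fila j).getD "" ++ "'"
                 else (PySem.List.pyGet? fila j).getD "") ++ ", ")
        (cad_WHERE ++ (PySem.List.pyGet? nom_campos j).getD "" ++ " IN ("))
        none (some (-2)) ++ ")  AND ") "")
      none (some (-4))
    = PySem.Str.join "  AND " (cols_busqueda.map (pvItemS nom_campos tipo_campos rows)) ++
        (if cols_busqueda = [] then "" else "  ") := by
  rcases h with h | h
  · subst h
    rw [List.foldl_nil, pvSliceEmpty 4]
    rfl
  · cases hcb : cols_busqueda with
    | nil =>
      rw [List.foldl_nil, pvSliceEmpty 4]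
      rfl
    | cons c cs =>
      rw [← hcb]
      have hb : ∀ (acc : String) (j : Int), j ∈ cols_busqueda →
          (PySem.Str.slice (rows.foldl (fun cw fila =>
              cw ++ (if (PySem.List.pyGet? tipo_campos j).getD "" = "str"
                     then "'" ++ (PySem.List.pyGet? fila j).getD "" ++ "'"
                     else (PySem.List.pyGet? fila j).getD "") ++ ", ")
            (acc ++ (PySem.List.pyGet? nom_campos j).getD "" ++ " IN ("))
            none (some (-2)) ++ ")  AND ")
          = acc ++ (pvItemS nom_campos tipo_campos rows j ++ "  AND ") := by
        intro acc j _
        have hrow : rows.foldl (fun cw fila =>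
            cw ++ (if (PySem.List.pyGet? tipo_campos j).getD "" = "str"
                   then "'" ++ (PySem.List.pyGet? fila j).getD "" ++ "'"
                   else (PySem.List.pyGet? fila j).getD "") ++ ", ")
            (acc ++ (PySem.List.pyGet? nom_campos j).getD "" ++ " IN (")
            = (acc ++ (PySem.List.pyGet? nom_campos j).getD "" ++ " IN (") ++
              PySem.Str.join "" ((rows.map (fun fila =>
                pvQ tipo_campos j ((PySem.List.pyGet? fila j).getD ""))).map (· ++ ", ")) := by
          have hb2 : ∀ (cw : String) (fila : List String), fila ∈ rows →
              (cw ++ (if (PySem.List.pyGet? tipo_campos j).getD "" = "str"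
                      then "'" ++ (PySem.List.pyGet? fila j).getD "" ++ "'"
                      else (PySem.List.pyGet? fila j).getD "") ++ ", ")
              = cw ++ (pvQ tipo_campos j ((PySem.List.pyGet? fila j).getD "") ++ ", ") := by
            intro cw fila _
            apply pvToListInj
            simp [pvQ]
          rw [PySem.List.foldl_congr_mem _ _ _ _ hb2, pvFoldlApp]
          congr 1
          simp [List.map_map, Function.comp_def]
        rw [hrow, pvSliceApp _ _ 2 (by norm_num)
              (by simpa using pvJoinLen (rows.map (fun fila =>
                pvQ tipo_campos j ((PySem.List.pyGet? fila j).getD ""))) ", " (by simpa using h)),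
            pvJoinTrim _ _ 2 (by simpa using h) (by norm_num) (by decide)]
        have h2 : PySem.Str.slice ", " none (some (-2)) = "" := by decide
        rw [h2, pvAppNil]
        apply pvToListInj
        simp [pvItemS]
      rw [PySem.List.foldl_congr_mem _ _ _ _ hb, pvFoldlApp, pvNilApp]
      have hm : cols_busqueda.map (fun j => pvItemS nom_campos tipo_campos rows j ++ "  AND ")
          = (cols_busqueda.map (pvItemS nom_campos tipo_campos rows)).map (· ++ "  AND ") := by
        simp [List.map_map]
      rw [hm, pvJoinTrim _ _ 4 (by simp [hcb]) (by norm_num) (by decide)]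
      have h4 : PySem.Str.slice "  AND " none (some (-4)) = "  " := by decide
      rw [h4, if_neg (by simp [hcb])]

-- B unfolded into the shared canonical fragments
theorem pvAltShape (nom_tabla : String) (rows : List (List String)) (cols_busqueda : List Int)
    (cols_a_modificar : List Int) (nom_campos : List String) (tipo_campos : List String) :
    crearMultiUpdateSql_alt nom_tabla rows cols_busqueda cols_a_modificar nom_campos tipo_campos
    = "UPDATE " ++ nom_tabla ++ " SET " ++
        PySem.Str.join "," (cols_a_modificar.map (pvCaseS nom_campos tipo_campos cols_busqueda rows)) ++
      " WHERE " ++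
        (PySem.Str.join "  AND " (cols_busqueda.map (pvItemS nom_campos tipo_campos rows)) ++
          (if cols_busqueda = [] then "" else "  ")) := by
  unfold crearMultiUpdateSql_alt
  dsimp only
  rw [pvZipMapSelf]
  simp only [pvCaseS, pvWhenS, pvCondS, pvPartS, pvItemS, List.map_map, Function.comp_def,
    List.map_eq_nil_iff]
  rfl

-- length bookkeeping for the tightness proof
theorem pvLenApp (s t : String) : (s ++ t).toList.length = s.toList.length + t.toList.length := by
  simp

theorem pvLenJoin (sep : String) (ps : List String) :
    (PySem.Str.join sep ps).toList.length
      = (ps.map (fun p => p.toList.length)).sum + sep.toList.length * (ps.length - 1) := by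
  induction ps with
  | nil => simp [PySem.Chars.join_nil]
  | cons p rest ih =>
    cases rest with
    | nil => simp [PySem.Chars.join_singleton]
    | cons q r =>
      simp only [PySem.Str.toList_join, List.map_cons] at ih ⊢
      rw [PySem.Chars.join_cons_cons]
      simp only [List.length_append, List.map_cons, List.sum_cons, List.length_cons] at ih ⊢
      have h1 : sep.toList.length * (r.length + 1 + 1 - 1)
          = sep.toList.length * (r.length + 1 - 1) + sep.toList.length := by
        simp [Nat.mul_succ]
      omega

theorem pvSumShift {α : Type} (l : List α) (f : α → ℕ) (c : ℕ) :
    (l.map (fun x => f x + c)).sum = (l.map f).sum + c * l.length := by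
  induction l with
  | nil => simp
  | cons x xs ih => simp [ih, Nat.mul_succ]; omega

-- A's WHERE clause when rows = []: the '(' is chopped off by the [:-2] trim
theorem pvWhereEmptyRows (nom_campos : List String) (cols_busqueda : List Int)
    (h : cols_busqueda ≠ []) :
    PySem.Str.slice (cols_busqueda.foldl (fun cad_WHERE j =>
      PySem.Str.slice (cad_WHERE ++ (PySem.List.pyGet? nom_campos j).getD "" ++ " IN (")
        none (some (-2)) ++ ")  AND ") "")
      none (some (-4))
    = PySem.Str.join ")  AND " (cols_busqueda.map (fun j =>
        (PySem.List.pyGet? nom_campos j).getD "" ++ " IN")) ++ ")  " := by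
  have hb : ∀ (acc : String) (j : Int), j ∈ cols_busqueda →
      (PySem.Str.slice (acc ++ (PySem.List.pyGet? nom_campos j).getD "" ++ " IN (")
        none (some (-2)) ++ ")  AND ")
      = acc ++ (((PySem.List.pyGet? nom_campos j).getD "" ++ " IN") ++ ")  AND ") := by
    intro acc j _
    rw [pvSliceApp (acc ++ (PySem.List.pyGet? nom_campos j).getD "") " IN (" 2 (by norm_num) (by decide)]
    have h2 : PySem.Str.slice " IN (" none (some (-2)) = " IN" := by decide
    rw [h2]
    apply pvToListInj
    simp
  rw [PySem.List.foldl_congr_mem _ _ _ _ hb, pvFoldlApp, pvNilApp]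
  have hm : cols_busqueda.map (fun j => ((PySem.List.pyGet? nom_campos j).getD "" ++ " IN") ++ ")  AND ")
      = (cols_busqueda.map (fun j => (PySem.List.pyGet? nom_campos j).getD "" ++ " IN")).map (· ++ ")  AND ") := by
    simp [List.map_map]
  rw [hm, pvJoinTrim _ _ 4 (by simpa using h) (by norm_num) (by decide)]
  have h4 : PySem.Str.slice ")  AND " none (some (-4)) = ")  " := by decide
  rw [h4]

-- A's CASE chain when cols_busqueda = []: every WHEN condition degenerates to ""
theorem pvCaseEmptyCb (nom_campos tipo_campos : List String) (rows : List (List String))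
    (cols_a_modificar : List Int) (h : cols_a_modificar ≠ []) :
    PySem.Str.slice (cols_a_modificar.foldl (fun cad_CASE i =>
      cad_CASE ++ (PySem.List.pyGet? nom_campos i).getD "" ++ " = CASE " ++
        (rows.foldl (fun cad_WHEN fila =>
          cad_WHEN ++ " WHEN " ++ " THEN " ++
            (if (PySem.List.pyGet? tipo_campos i).getD "" = "str"
             then "'" ++ (PySem.List.pyGet? fila i).getD "" ++ "'"
             else (PySem.List.pyGet? fila i).getD "") ++ "  ") "") ++
      " END,") "")
      none (some (-1))
    = PySem.Str.join "," (cols_a_modificar.map (fun i =>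
        (PySem.List.pyGet? nom_campos i).getD "" ++ " = CASE " ++
          PySem.Str.join "" (rows.map (fun fila =>
            " WHEN " ++ " THEN " ++ pvQ tipo_campos i ((PySem.List.pyGet? fila i).getD "") ++ "  ")) ++
        " END")) := by
  have hb : ∀ (acc : String) (i : Int), i ∈ cols_a_modificar →
      (acc ++ (PySem.List.pyGet? nom_campos i).getD "" ++ " = CASE " ++
        (rows.foldl (fun cad_WHEN fila =>
          cad_WHEN ++ " WHEN " ++ " THEN " ++
            (if (PySem.List.pyGet? tipo_campos i).getD "" = "str"
             then "'" ++ (PySem.List.pyGet? fila i).getD "" ++ "'"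
             else (PySem.List.pyGet? fila i).getD "") ++ "  ") "") ++
      " END,")
      = acc ++ (((PySem.List.pyGet? nom_campos i).getD "" ++ " = CASE " ++
          PySem.Str.join "" (rows.map (fun fila =>
            " WHEN " ++ " THEN " ++ pvQ tipo_campos i ((PySem.List.pyGet? fila i).getD "") ++ "  ")) ++
        " END") ++ ",") := by
    intro acc i _
    have hw : rows.foldl (fun cad_WHEN fila =>
        cad_WHEN ++ " WHEN " ++ " THEN " ++
          (if (PySem.List.pyGet? tipo_campos i).getD "" = "str"
           then "'" ++ (PySem.List.pyGet? fila i).getD "" ++ "'"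
           else (PySem.List.pyGet? fila i).getD "") ++ "  ") ""
        = PySem.Str.join "" (rows.map (fun fila =>
            " WHEN " ++ " THEN " ++ pvQ tipo_campos i ((PySem.List.pyGet? fila i).getD "") ++ "  ")) := by
      have hb2 : ∀ (cw : String) (fila : List String), fila ∈ rows →
          (cw ++ " WHEN " ++ " THEN " ++
            (if (PySem.List.pyGet? tipo_campos i).getD "" = "str"
             then "'" ++ (PySem.List.pyGet? fila i).getD "" ++ "'"
             else (PySem.List.pyGet? fila i).getD "") ++ "  ")
          = cw ++ (" WHEN " ++ " THEN " ++ pvQ tipo_campos i ((PySem.List.pyGet? fila i).getD "") ++ "  ") := by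
        intro cw fila _
        apply pvToListInj
        simp [pvQ]
      rw [PySem.List.foldl_congr_mem _ _ _ _ hb2, pvFoldlApp, pvNilApp]
    rw [hw]
    apply pvToListInj
    simp
  rw [PySem.List.foldl_congr_mem _ _ _ _ hb, pvFoldlApp, pvNilApp]
  have hm : cols_a_modificar.map (fun i =>
        ((PySem.List.pyGet? nom_campos i).getD "" ++ " = CASE " ++
          PySem.Str.join "" (rows.map (fun fila =>
            " WHEN " ++ " THEN " ++ pvQ tipo_campos i ((PySem.List.pyGet? fila i).getD "") ++ "  ")) ++
        " END") ++ ",")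
      = (cols_a_modificar.map (fun i =>
        (PySem.List.pyGet? nom_campos i).getD "" ++ " = CASE " ++
          PySem.Str.join "" (rows.map (fun fila =>
            " WHEN " ++ " THEN " ++ pvQ tipo_campos i ((PySem.List.pyGet? fila i).getD "") ++ "  ")) ++
        " END")).map (· ++ ",") := by
    simp [List.map_map]
  rw [hm, pvJoinTrim _ _ 1 (by simpa using h) (by norm_num) (by decide)]
  have h1 : PySem.Str.slice "," none (some (-1)) = "" := by decide
  rw [h1, pvAppNil]

-- ===== VERDICT (by name: the statement is the Claim_ definition above) =====
theorem crearMultiUpdateSql_spec : Claim_unchanged_crearMultiUpdateSql := by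
  intro nom_tabla rows cols_busqueda cols_a_modificar nom_campos tipo_campos _dom _pre hnd
  unfold D_crearMultiUpdateSql at hnd
  push_neg at hnd
  have hC : cols_a_modificar = [] ∨ rows = [] ∨ cols_busqueda ≠ [] := by tauto
  have hW : cols_busqueda = [] ∨ rows ≠ [] := by tauto
  show crearMultiUpdateSql nom_tabla rows cols_busqueda cols_a_modificar nom_campos tipo_campos
      = crearMultiUpdateSql_alt nom_tabla rows cols_busqueda cols_a_modificar nom_campos tipo_campos
  unfold crearMultiUpdateSql
  rw [pvCaseA nom_campos tipo_campos cols_busqueda rows cols_a_modificar hC,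
      pvWhereA nom_campos tipo_campos rows cols_busqueda hW,
      pvAltShape]

theorem crearMultiUpdateSql_changed : Claim_changed_crearMultiUpdateSql := by
  unfold Claim_changed_crearMultiUpdateSql; decide

theorem crearMultiUpdateSql_tight : Claim_exact_crearMultiUpdateSql := by
  intro nom_tabla rows cols_busqueda cols_a_modificar nom_campos tipo_campos _dom _pre hD hEq
  unfold crearMultiUpdateSql at hEq
  rw [pvAltShape] at hEq
  rcases hD with ⟨hr, hcb⟩ | ⟨hcb, hr, hcm⟩
  · -- rows = [], cols_busqueda ≠ [] : the WHERE clauses have different lengths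
    rw [pvCaseA nom_campos tipo_campos cols_busqueda rows cols_a_modificar (Or.inr (Or.inl hr)),
        if_neg hcb] at hEq
    subst hr
    simp only [List.foldl_nil] at hEq
    rw [pvWhereEmptyRows nom_campos cols_busqueda hcb] at hEq
    have hm : 0 < cols_busqueda.length := List.length_pos_of_ne_nil hcb
    have hL := congrArg (fun s => s.toList.length) hEq
    simp only [pvLenApp] at hL
    have hA : (PySem.Str.join ")  AND " (cols_busqueda.map (fun j =>
        (PySem.List.pyGet? nom_campos j).getD "" ++ " IN"))).toList.length
        = (cols_busqueda.map (fun j =>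
            ((PySem.List.pyGet? nom_campos j).getD "").toList.length)).sum
          + 3 * cols_busqueda.length + 7 * (cols_busqueda.length - 1) := by
      rw [pvLenJoin]
      simp only [List.map_map, Function.comp_def, List.length_map]
      have h1 : cols_busqueda.map (fun j => ((PySem.List.pyGet? nom_campos j).getD "" ++ " IN").toList.length)
          = cols_busqueda.map (fun j => ((PySem.List.pyGet? nom_campos j).getD "").toList.length + 3) := by
        apply List.map_congr_left
        intro j _
        simp
      rw [h1, pvSumShift]
      have h2 : (")  AND " : String).toList.length = 7 := by decide
      rw [h2]
    have hB : (PySem.Str.join "  AND " (cols_busqueda.map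
        (pvItemS nom_campos tipo_campos []))).toList.length
        = (cols_busqueda.map (fun j =>
            ((PySem.List.pyGet? nom_campos j).getD "").toList.length)).sum
          + 6 * cols_busqueda.length + 6 * (cols_busqueda.length - 1) := by
      rw [pvLenJoin]
      simp only [List.map_map, Function.comp_def, List.length_map]
      have h1 : cols_busqueda.map (fun j => (pvItemS nom_campos tipo_campos [] j).toList.length)
          = cols_busqueda.map (fun j => ((PySem.List.pyGet? nom_campos j).getD "").toList.length + 6) := by
        apply List.map_congr_left
        intro j _
        simp only [pvItemS, pvLenApp, List.map_nil]
        rw [pvLenJoin]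
        simp
      rw [h1, pvSumShift]
      have h2 : ("  AND " : String).toList.length = 6 := by decide
      rw [h2]
    have hc1 : (")  " : String).toList.length = 3 := by decide
    have hc2 : ("  " : String).toList.length = 2 := by decide
    rw [hA, hB, hc1, hc2] at hL
    omega
  · -- cols_busqueda = [], rows ≠ [], cols_a_modificar ≠ [] : the WHEN spacing differs
    subst hcb
    simp only [List.foldl_nil, pvSliceEmpty, pvAppNil] at hEq
    rw [pvCaseEmptyCb nom_campos tipo_campos rows cols_a_modificar hcm] at hEq
    have hm : 0 < cols_a_modificar.length := List.length_pos_of_ne_nil hcm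
    have hrr : 0 < rows.length := List.length_pos_of_ne_nil hr
    have hL := congrArg (fun s => s.toList.length) hEq
    simp only [pvLenApp] at hL
    have hA : (PySem.Str.join "," (cols_a_modificar.map (fun i =>
        (PySem.List.pyGet? nom_campos i).getD "" ++ " = CASE " ++
          PySem.Str.join "" (rows.map (fun fila =>
            " WHEN " ++ " THEN " ++ pvQ tipo_campos i ((PySem.List.pyGet? fila i).getD "") ++ "  ")) ++
        " END"))).toList.length
        = (cols_a_modificar.map (fun i =>
            ((PySem.List.pyGet? nom_campos i).getD "").toList.length +
            (rows.map (fun fila =>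
              (pvQ tipo_campos i ((PySem.List.pyGet? fila i).getD "")).toList.length)).sum)).sum
          + (14 * rows.length + 12) * cols_a_modificar.length + (cols_a_modificar.length - 1) := by
      rw [pvLenJoin]
      simp only [List.map_map, Function.comp_def, List.length_map]
      have h1 : cols_a_modificar.map (fun i =>
            ((PySem.List.pyGet? nom_campos i).getD "" ++ " = CASE " ++
              PySem.Str.join "" (rows.map (fun fila =>
                " WHEN " ++ " THEN " ++ pvQ tipo_campos i ((PySem.List.pyGet? fila i).getD "") ++ "  ")) ++
            " END").toList.length)
          = cols_a_modificar.map (fun i =>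
            (((PySem.List.pyGet? nom_campos i).getD "").toList.length +
              (rows.map (fun fila =>
                (pvQ tipo_campos i ((PySem.List.pyGet? fila i).getD "")).toList.length)).sum)
            + (14 * rows.length + 12)) := by
        apply List.map_congr_left
        intro i _
        simp only [pvLenApp]
        rw [pvLenJoin]
        simp only [List.map_map, Function.comp_def, List.length_map]
        have h2 : rows.map (fun fila =>
              (" WHEN " ++ " THEN " ++ pvQ tipo_campos i ((PySem.List.pyGet? fila i).getD "") ++ "  ").toList.length)
            = rows.map (fun fila =>
              (pvQ tipo_campos i ((PySem.List.pyGet? fila i).getD "")).toList.length + 14) := by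
          apply List.map_congr_left
          intro fila _
          simp
        rw [h2, pvSumShift]
        have h3 : (" = CASE " : String).toList.length = 8 := by decide
        have h4 : (" END" : String).toList.length = 4 := by decide
        have h5 : ("" : String).toList.length = 0 := by decide
        simp only [h3, h4, h5]
        omega
      rw [h1, pvSumShift]
      have h2 : ("," : String).toList.length = 1 := by decide
      rw [h2]
      omega
    have hB : (PySem.Str.join "," (cols_a_modificar.map
        (pvCaseS nom_campos tipo_campos [] rows))).toList.length
        = (cols_a_modificar.map (fun i =>
            ((PySem.List.pyGet? nom_campos i).getD "").toList.length +
            (rows.map (fun fila =>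
              (pvQ tipo_campos i ((PySem.List.pyGet? fila i).getD "")).toList.length)).sum)).sum
          + (15 * rows.length + 12) * cols_a_modificar.length + (cols_a_modificar.length - 1) := by
      rw [pvLenJoin]
      simp only [List.map_map, Function.comp_def, List.length_map]
      have h1 : cols_a_modificar.map (fun i =>
            (pvCaseS nom_campos tipo_campos [] rows i).toList.length)
          = cols_a_modificar.map (fun i =>
            (((PySem.List.pyGet? nom_campos i).getD "").toList.length +
              (rows.map (fun fila =>
                (pvQ tipo_campos i ((PySem.List.pyGet? fila i).getD "")).toList.length)).sum)
            + (15 * rows.length + 12)) := by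
        apply List.map_congr_left
        intro i _
        simp only [pvCaseS, pvLenApp]
        rw [pvLenJoin]
        simp only [List.map_map, Function.comp_def, List.length_map]
        have h2 : rows.map (fun fila =>
              (pvWhenS nom_campos tipo_campos [] i fila).toList.length)
            = rows.map (fun fila =>
              (pvQ tipo_campos i ((PySem.List.pyGet? fila i).getD "")).toList.length + 15) := by
          apply List.map_congr_left
          intro fila _
          simp only [pvWhenS, pvCondS, pvLenApp, List.map_nil]
          rw [pvLenJoin]
          simp
          omega
        rw [h2, pvSumShift]
        have h3 : (" = CASE " : String).toList.length = 8 := by decide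
        have h4 : (" END" : String).toList.length = 4 := by decide
        have h5 : ("" : String).toList.length = 0 := by decide
        simp only [h3, h4, h5]
        omega
      rw [h1, pvSumShift]
      have h2 : ("," : String).toList.length = 1 := by decide
      rw [h2]
      omega
    rw [hA, hB] at hL
    have hmul : (15 * rows.length + 12) * cols_a_modificar.length
        = (14 * rows.length + 12) * cols_a_modificar.length + rows.length * cols_a_modificar.length := by
      ring
    have hpos : 0 < rows.length * cols_a_modificar.length := Nat.mul_pos hrr hm
    rw [hmul] at hL
    omega
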